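-- pv_equiv track=rewrite | github.com/KungCheops/aigrader | examples/assignment-12/assignment-12-R-00995569463070.py | indexString
-- ===== SOURCE A (Python) =====
-- def indexString(s, k):
--     ds = {}
--     stillequal = True
--     if k == 0:
--         return ds
--     for i in range(len(s) - k + 1):
--         for j in range(k):
--             if s[i] != s[i + j]:
--                 stillequal = False
--         if stillequal:
--             if s[i] in ds:
--                 ds[s[i]] += 1
--             else:
--                 ds[s[i]] = 1
--         stillequal = True
--     return ds
-- ===== SOURCE B (Python) =====
-- def indexString(s, k):
--     # Run-length encoding: a length-k window starting at i is all-equal iff it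
--     # lies inside one run; a run of length L contributes max(0, L-k+1) starts.
--     if k < 1:
--         return {}
--     ds = {}
--     n = len(s)
--     i = 0
--     while i < n:
--         c = s[i]
--         j = i
--         while j < n and s[j] == c:
--             j += 1
--         run = j - i
--         if run >= k:
--             ds[c] = ds.get(c, 0) + (run - k + 1)
--         i = j
--     return ds
-- ===== Notes on version B (the rewrite author's own statement) =====
-- stated objective: faster
-- what changed: Replaced the O(n*k) scan that re-checks every length-k window character by character with a single run-length-encoding pass that adds max(0, L-k+1) per run of length L.
import Mathlib
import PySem

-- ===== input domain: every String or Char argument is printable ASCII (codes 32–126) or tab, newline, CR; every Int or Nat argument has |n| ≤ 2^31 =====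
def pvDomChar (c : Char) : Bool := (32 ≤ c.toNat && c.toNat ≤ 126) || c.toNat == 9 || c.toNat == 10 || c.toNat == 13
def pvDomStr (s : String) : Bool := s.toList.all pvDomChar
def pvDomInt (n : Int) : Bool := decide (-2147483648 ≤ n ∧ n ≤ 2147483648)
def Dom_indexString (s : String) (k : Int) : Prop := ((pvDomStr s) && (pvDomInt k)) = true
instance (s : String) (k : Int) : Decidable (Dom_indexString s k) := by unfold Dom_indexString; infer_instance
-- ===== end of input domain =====

-- B replaces A's per-position window re-check by a single run-length-encoding pass
-- (one run of length L contributes max(0, L-k+1) window starts); objective: faster.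

-- ===== PORT A =====
def indexString (s : String) (k : Int) : List (String × Int) :=
  let cs := s.toList
  if k = 0 then (PySem.Dict.empty : PySem.Dict String Int).items
  else
    ((PySem.List.pyRange 0 ((cs.length : Int) - k + 1) 1).foldl
      (fun (ds : PySem.Dict String Int) i =>
        let se := (PySem.List.pyRange 0 k 1).foldl
          (fun se j =>
            if PySem.List.pyGetD cs i ' ' ≠ PySem.List.pyGetD cs (i + j) ' ' then false else se)
          true
        if se then
          let c := String.ofList [PySem.List.pyGetD cs i ' ']
          if ds.contains c then ds.insert c (ds.getD c 0 + 1) else ds.insert c 1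
        else ds)
      PySem.Dict.empty).items

-- ===== PORT B =====
-- inner `while j < n and s[j] == c: j += 1` : count of leading chars equal to c, and the remainder
def altScan (c : Char) : List Char → Nat × List Char
  | [] => (0, [])
  | d :: rest => if d == c then ((altScan c rest).1 + 1, (altScan c rest).2) else (0, d :: rest)

theorem altScan_len (c : Char) : ∀ l : List Char, (altScan c l).2.length ≤ l.length := by
  intro l
  induction l with
  | nil => simp [altScan]
  | cons d rest ih =>
    by_cases h : (d == c) = true
    · simp [altScan, h]; omega
    · simp [altScan, h]

-- outer `while i < n` loop over runs
def altRun (k : Int) (cs : List Char) (ds : PySem.Dict String Int) : PySem.Dict String Int :=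
  match cs with
  | [] => ds
  | c :: rest =>
    let p := altScan c rest
    let run : Int := (p.1 : Int) + 1
    let key := String.ofList [c]
    let ds' := if k ≤ run then ds.insert key (ds.getD key 0 + (run - k + 1)) else ds
    altRun k p.2 ds'
termination_by cs.length
decreasing_by exact Nat.lt_succ_of_le (altScan_len c rest)

def indexString_alt (s : String) (k : Int) : List (String × Int) :=
  if k < 1 then (PySem.Dict.empty : PySem.Dict String Int).items
  else (altRun k s.toList PySem.Dict.empty).items

-- ===== PRECONDITION & SPEC =====
-- Pre_ excludes k < 0, on which Python A raises IndexError (it indexes past the string's end).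
def Pre_indexString (s : String) (k : Int) : Prop := 0 ≤ k
instance (s : String) (k : Int) : Decidable (Pre_indexString s k) := by unfold Pre_indexString; infer_instance
def pvWitness_indexString : String × Int := ("aabaa", 2)

def Spec_indexString (s : String) (k : Int) (out : List (String × Int)) : Prop := out = indexString_alt s k
instance (s : String) (k : Int) (out : List (String × Int)) : Decidable (Spec_indexString s k out) := by unfold Spec_indexString; infer_instance

-- ===== CLAIM (what is proved, stated in full; the proofs are below) =====
def Claim_equal_indexString : Prop := ∀ (s : String) (k : Int), Dom_indexString s k → Pre_indexString s k → Spec_indexString s k (indexString s k)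

-- ===== LEMMAS AND PROOFS =====

def bumpD (ds : PySem.Dict String Int) (c : Char) : PySem.Dict String Int :=
  ds.insert (String.ofList [c]) (ds.getD (String.ofList [c]) 0 + 1)

def cFold (l : List Char) (ds : PySem.Dict String Int) : PySem.Dict String Int :=
  l.foldl bumpD ds

def validList (K : Nat) : List Char → List Char
  | [] => []
  | c :: rest => (if K ≤ (rest.takeWhile (· == c)).length + 1 then [c] else []) ++ validList K rest

theorem branch_bump (ds : PySem.Dict String Int) (c : Char) :
    (if ds.contains (String.ofList [c]) then
        ds.insert (String.ofList [c]) (ds.getD (String.ofList [c]) 0 + 1)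
      else ds.insert (String.ofList [c]) 1) = bumpD ds c := by
  by_cases h : ds.contains (String.ofList [c]) = true
  · rw [if_pos h]; rfl
  · rw [if_neg h, bumpD]
    have h0 : ds.getD (String.ofList [c]) 0 = 0 := by
      have := (PySem.Dict.get?_eq_none_iff_contains ds (String.ofList [c])).mpr (by simpa using h)
      simp [PySem.Dict.getD, this]
    rw [h0]; norm_num

theorem take_char (cs : List Char) (c : Char) : ∀ K : Nat, K ≤ cs.length →
    ((∀ jn, jn < K → cs.getD jn ' ' = c) ↔ K ≤ (cs.takeWhile (· == c)).length) := by
  induction cs with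
  | nil => intro K hK; simp at hK; subst hK; simp
  | cons d tl ih =>
    intro K hK
    match K with
    | 0 => simp
    | K + 1 =>
      rw [List.takeWhile_cons]
      by_cases hd : d = c
      · rw [if_pos (by simp [hd])]
        simp only [List.length_cons, Nat.add_le_add_iff_right]
        rw [← ih K (by simpa using hK)]
        constructor
        · intro h jn hjn
          have := h (jn + 1) (by omega)
          simpa using this
        · intro h jn hjn
          match jn with
          | 0 => simpa using hd
          | jn + 1 => simpa using h jn (by omega)
      · rw [if_neg (by simp [hd])]
        simp only [List.length_nil]
        constructor
        · intro h; exact absurd (by simpa using h 0 (by omega)) hd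
        · omega

theorem valid_nil_of_short (K : Nat) : ∀ cs : List Char, cs.length < K → validList K cs = [] := by
  intro cs
  induction cs with
  | nil => intro _; rfl
  | cons c rest ih =>
    intro h
    rw [validList]
    have ht : (rest.takeWhile (· == c)).length ≤ rest.length :=
      List.Sublist.length_le (List.takeWhile_sublist _)
    rw [if_neg (by simp at h ⊢; omega), ih (by simp at h; omega)]
    rfl

theorem head_dropWhile_false (l : List Char) (p : Char → Bool) (d : Char)
    (h : (l.dropWhile p).head? = some d) : p d = false := by
  induction l with
  | nil => simp [List.dropWhile] at h
  | cons x xs ih =>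
    rw [List.dropWhile_cons] at h
    split at h
    · exact ih h
    · simp at h; subst h; simp_all

theorem altScan_eq (c : Char) : ∀ l : List Char,
    altScan c l = ((l.takeWhile (· == c)).length, l.dropWhile (· == c)) := by
  intro l
  induction l with
  | nil => rfl
  | cons d rest ih =>
    rw [altScan, List.takeWhile_cons, List.dropWhile_cons]
    by_cases h : (d == c) = true
    · simp [h, ih]
    · simp [h]

theorem takeWhile_replicate_append (c : Char) (tail : List Char)
    (ht : tail.takeWhile (· == c) = []) :
    ∀ m : Nat, ((List.replicate m c ++ tail).takeWhile (· == c)).length = m := by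
  intro m
  induction m with
  | zero => simpa using congrArg List.length ht
  | succ m ih =>
    rw [List.replicate_succ, List.cons_append, List.takeWhile_cons, if_pos (by simp)]
    simpa using ih

theorem valid_replicate (K : Nat) (hK : 1 ≤ K) (c : Char) (tail : List Char)
    (h : ∀ d ∈ tail.head?, (d == c) = false) :
    ∀ m : Nat, validList K (List.replicate m c ++ tail)
      = List.replicate (m + 1 - K) c ++ validList K tail := by
  have ht : tail.takeWhile (· == c) = [] := by
    match htl : tail with
    | [] => rfl
    | d :: tl => rw [List.takeWhile_cons, if_neg (by simpa using h d (by simp))]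
  intro m
  induction m with
  | zero => rw [show 0 + 1 - K = 0 from by omega]; simp
  | succ m ih =>
    rw [List.replicate_succ, List.cons_append, validList,
      takeWhile_replicate_append c tail ht m, ih]
    by_cases hm : K ≤ m + 1
    · rw [if_pos hm, show m + 1 + 1 - K = (m + 1 - K) + 1 from by omega, List.replicate_succ]
      rfl
    · rw [if_neg hm, show m + 1 + 1 - K = 0 from by omega, show m + 1 - K = 0 from by omega]
      rfl

theorem cFold_replicate (c : Char) : ∀ (r : Nat), 1 ≤ r → ∀ ds,
    cFold (List.replicate r c) ds
      = ds.insert (String.ofList [c]) (ds.getD (String.ofList [c]) 0 + (r : Int)) := by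
  intro r
  induction r with
  | zero => omega
  | succ r ih =>
    intro _ ds
    match hr : r with
    | 0 => simp [cFold, bumpD]
    | r' + 1 =>
      rw [List.replicate_succ, show cFold (c :: List.replicate (r' + 1) c) ds
          = cFold (List.replicate (r' + 1) c) (bumpD ds c) from rfl,
        ih (by omega) (bumpD ds c), bumpD,
        PySem.Dict.getD_insert_self, PySem.Dict.insert_insert_self]
      congr 1
      push_cast
      ring

def pStep (cs : List Char) (K : Nat) (ds : PySem.Dict String Int) (i : Nat) : PySem.Dict String Int :=
  if (∀ jn, jn < K → cs.getD (i + jn) ' ' = cs.getD i ' ') then bumpD ds (cs.getD i ' ') else ds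

theorem pStep_shift (c : Char) (rest : List Char) (K : Nat) (ds : PySem.Dict String Int) (i : Nat) :
    pStep (c :: rest) K ds (i + 1) = pStep rest K ds i := by
  have h1 : ∀ jn : Nat, (c :: rest).getD (i + 1 + jn) ' ' = rest.getD (i + jn) ' ' := by
    intro jn
    rw [show i + 1 + jn = (i + jn) + 1 from by omega, List.getD_cons_succ]
  rw [pStep, pStep]
  simp only [h1, List.getD_cons_succ]

theorem pStep_zero (c : Char) (rest : List Char) (K : Nat) (hK : 1 ≤ K)
    (hKn : K ≤ rest.length + 1) (ds : PySem.Dict String Int) :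
    pStep (c :: rest) K ds 0
      = cFold (if K ≤ (rest.takeWhile (· == c)).length + 1 then [c] else []) ds := by
  have hchar : (c :: rest).getD 0 ' ' = c := rfl
  have hiff := take_char (c :: rest) c K (by simpa using hKn)
  have htw : ((c :: rest).takeWhile (· == c)).length = (rest.takeWhile (· == c)).length + 1 := by
    rw [List.takeWhile_cons, if_pos (by simp)]; simp
  rw [htw] at hiff
  rw [pStep]
  simp only [Nat.zero_add, hchar]
  by_cases hc : K ≤ (rest.takeWhile (· == c)).length + 1
  · rw [if_pos (fun jn hjn => hiff.mpr hc jn hjn), if_pos hc]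
    rfl
  · rw [if_neg (fun hall => hc (hiff.mp hall)), if_neg hc]
    rfl

theorem aFold_eq (K : Nat) (hK : 1 ≤ K) :
    ∀ (cs : List Char) (ds : PySem.Dict String Int),
      (List.range (cs.length + 1 - K)).foldl (pStep cs K) ds = cFold (validList K cs) ds := by
  intro cs
  induction cs with
  | nil =>
    intro ds
    rw [show List.length ([] : List Char) + 1 - K = 0 from by simp; omega]
    simp [validList, cFold]
  | cons c rest ih =>
    intro ds
    by_cases hKn : K ≤ rest.length + 1
    · rw [show (c :: rest).length + 1 - K = (rest.length + 1 - K) + 1 from by simp; omega,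
        List.range_succ_eq_map, List.foldl_cons, List.foldl_map]
      have hsh : (fun (ds : PySem.Dict String Int) (i : Nat) => pStep (c :: rest) K ds i.succ)
          = pStep rest K := by
        funext ds i
        exact pStep_shift c rest K ds i
      rw [hsh, ih (pStep (c :: rest) K ds 0), pStep_zero c rest K hK hKn ds, validList]
      rw [cFold, cFold, cFold, List.foldl_append]
    · rw [show (c :: rest).length + 1 - K = 0 from by simp; omega,
        valid_nil_of_short K (c :: rest) (by simp; omega)]
      simp [cFold]

theorem takeWhile_eq_replicate (c : Char) (l : List Char) :
    l.takeWhile (· == c) = List.replicate (l.takeWhile (· == c)).length c := by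
  rw [List.eq_replicate_iff]
  exact ⟨rfl, fun b hb => by simpa using List.mem_takeWhile_imp hb⟩

theorem altRun_eq (K : Nat) (hK : 1 ≤ K) (cs : List Char) (ds : PySem.Dict String Int) :
    altRun (K : Int) cs ds = cFold (validList K cs) ds := by
  match cs with
  | [] => simp [altRun, validList, cFold]
  | c :: rest =>
    rw [altRun, altScan_eq]
    set t := (rest.takeWhile (· == c)).length with ht
    set tail := rest.dropWhile (· == c) with htl
    have hlen : tail.length ≤ rest.length := List.Sublist.length_le (List.dropWhile_sublist _)
    have ihere := altRun_eq K hK tail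
    have hdecomp : c :: rest = List.replicate (t + 1) c ++ tail := by
      rw [List.replicate_succ, List.cons_append]
      congr 1
      conv_lhs => rw [← List.takeWhile_append_dropWhile (p := (· == c)) (l := rest)]
      rw [takeWhile_eq_replicate c rest]
    have hhead : ∀ d ∈ tail.head?, (d == c) = false := by
      intro d hd
      exact head_dropWhile_false rest _ d (by simpa using hd)
    have hvalid : validList K (c :: rest) = List.replicate (t + 1 + 1 - K) c ++ validList K tail := by
      rw [hdecomp, valid_replicate K hK c tail hhead (t + 1)]
    simp only [ihere, hvalid, cFold, List.foldl_append]
    congr 1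
    by_cases hc : (K : Int) ≤ (t : Int) + 1
    · rw [if_pos hc]
      have hrep := cFold_replicate c (t + 1 + 1 - K) (by omega) ds
      rw [cFold] at hrep
      rw [hrep]
      congr 1
      omega
    · rw [if_neg hc, show t + 1 + 1 - K = 0 from by omega]
      rfl
termination_by cs.length
decreasing_by simpa using Nat.lt_succ_of_le hlen

theorem inner_guard (cs : List Char) (i : Int) :
    ∀ (L : List Int) (b : Bool),
      L.foldl (fun se j => if PySem.List.pyGetD cs i ' ' ≠ PySem.List.pyGetD cs (i + j) ' ' then false else se) b
        = (b && L.all (fun j => PySem.List.pyGetD cs (i + j) ' ' == PySem.List.pyGetD cs i ' ')) := by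
  intro L
  induction L with
  | nil => simp
  | cons a L ih =>
    intro b
    rw [List.foldl_cons, List.all_cons]
    by_cases h : PySem.List.pyGetD cs i ' ' = PySem.List.pyGetD cs (i + a) ' '
    · rw [if_neg (fun hc => hc h), ih b,
        show (PySem.List.pyGetD cs (i + a) ' ' == PySem.List.pyGetD cs i ' ') = true from by simp [h]]
      simp
    · rw [if_pos h, ih false,
        show (PySem.List.pyGetD cs (i + a) ' ' == PySem.List.pyGetD cs i ' ') = false from by
          simp; exact fun hc => h hc.symm]
      simp

theorem inner_char (cs : List Char) (K : Nat) (i : Nat) :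
    ((PySem.List.pyRange 0 (K : Int) 1).all
        (fun j => PySem.List.pyGetD cs ((i : Int) + j) ' ' == PySem.List.pyGetD cs (i : Int) ' '))
      = decide (∀ jn, jn < K → cs.getD (i + jn) ' ' = cs.getD i ' ') := by
  rcases Bool.dichotomy ((PySem.List.pyRange 0 (K : Int) 1).all
      (fun j => PySem.List.pyGetD cs ((i : Int) + j) ' ' == PySem.List.pyGetD cs (i : Int) ' ')) with hb | hb <;>
    rw [hb]
  · symm; rw [decide_eq_false_iff_not]
    intro hall
    rw [Bool.eq_false_iff] at hb
    apply hb
    rw [List.all_eq_true]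
    intro j hj
    rw [PySem.List.mem_pyRange_one] at hj
    obtain ⟨h0, hk⟩ := hj
    have hje : j = ((j.toNat : Nat) : Int) := by omega
    rw [hje, ← Int.natCast_add, PySem.List.pyGetD_natCast, PySem.List.pyGetD_natCast, beq_iff_eq]
    exact hall j.toNat (by omega)
  · symm; rw [decide_eq_true_iff]
    rw [List.all_eq_true] at hb
    intro jn hjn
    have := hb ((jn : Int)) (by rw [PySem.List.mem_pyRange_one]; omega)
    rw [← Int.natCast_add, PySem.List.pyGetD_natCast, PySem.List.pyGetD_natCast, beq_iff_eq] at this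
    exact this



theorem step_eq (cs : List Char) (K : Nat) (ds : PySem.Dict String Int) (i : Nat) :
    (fun (ds : PySem.Dict String Int) (i : Int) =>
        let se := (PySem.List.pyRange 0 (K : Int) 1).foldl
          (fun se j =>
            if PySem.List.pyGetD cs i ' ' ≠ PySem.List.pyGetD cs (i + j) ' ' then false else se)
          true
        if se then
          let c := String.ofList [PySem.List.pyGetD cs i ' ']
          if ds.contains c then ds.insert c (ds.getD c 0 + 1) else ds.insert c 1
        else ds) ds ((0 : Int) + (i : Int))
      = pStep cs K ds i := by
  simp only [zero_add]
  show (if ((PySem.List.pyRange 0 (K : Int) 1).foldl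
      (fun se j =>
        if PySem.List.pyGetD cs (i : Int) ' ' ≠ PySem.List.pyGetD cs ((i : Int) + j) ' ' then false else se)
      true) = true then
      (if ds.contains (String.ofList [PySem.List.pyGetD cs (i : Int) ' ']) then
        ds.insert (String.ofList [PySem.List.pyGetD cs (i : Int) ' '])
          (ds.getD (String.ofList [PySem.List.pyGetD cs (i : Int) ' ']) 0 + 1)
      else ds.insert (String.ofList [PySem.List.pyGetD cs (i : Int) ' ']) 1)
    else ds) = pStep cs K ds i
  rw [inner_guard cs (i : Int) (PySem.List.pyRange 0 (K : Int) 1) true, Bool.true_and,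
    inner_char cs K i, pStep,
    show PySem.List.pyGetD cs (i : Int) ' ' = cs.getD i ' ' from by
      simp [PySem.List.pyGetD_natCast]]
  by_cases hP : ∀ jn, jn < K → cs.getD (i + jn) ' ' = cs.getD i ' '
  · rw [if_pos (decide_eq_true hP), if_pos hP, branch_bump]
  · rw [if_neg (by simpa using hP), if_neg hP]

theorem port_outer_eq (K : Nat) (hK : 1 ≤ K) (cs : List Char) (ds : PySem.Dict String Int) :
    (PySem.List.pyRange 0 ((cs.length : Int) - (K : Int) + 1) 1).foldl
      (fun (ds : PySem.Dict String Int) i =>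
        let se := (PySem.List.pyRange 0 (K : Int) 1).foldl
          (fun se j =>
            if PySem.List.pyGetD cs i ' ' ≠ PySem.List.pyGetD cs (i + j) ' ' then false else se)
          true
        if se then
          let c := String.ofList [PySem.List.pyGetD cs i ' ']
          if ds.contains c then ds.insert c (ds.getD c 0 + 1) else ds.insert c 1
        else ds) ds
    = (List.range (cs.length + 1 - K)).foldl (pStep cs K) ds := by
  rw [PySem.List.pyRange_one 0 ((cs.length : Int) - (K : Int) + 1), List.foldl_map,
    show (((cs.length : Int) - (K : Int) + 1) - 0).toNat = cs.length + 1 - K from by omega]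
  apply PySem.List.foldl_congr_mem
  intro acc x _
  exact step_eq cs K acc x

-- ===== VERDICT (by name: the statement is the Claim_ definition above) =====
theorem indexString_spec : Claim_equal_indexString := by
  intro s k _ hpre
  unfold Spec_indexString
  by_cases hk0 : k = 0
  · subst hk0; simp [indexString, indexString_alt]
  · have hk1 : 1 ≤ k := by
      unfold Pre_indexString at hpre; omega
    have hkK : k = ((k.toNat : Nat) : Int) := by omega
    have hK1 : 1 ≤ k.toNat := by omega
    rw [indexString, indexString_alt, if_neg hk0, if_neg (by omega)]
    congr 1
    rw [hkK, altRun_eq k.toNat hK1, port_outer_eq k.toNat hK1, aFold_eq k.toNat hK1]
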